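-- pv_equiv track=rewrite | github.com/martin-barrero/ProgIIIG1-Act08-TG | kakuro.py | FixRowsConstraints
-- ===== SOURCE A (Python) =====
-- def FixRowsConstraints(lists):
--   result = []
--   for sublist in lists:
--     actualGroup = [sublist[0]]
--     for i in range(1, len(sublist)):
--       previous = sublist[i - 1]
--       actual = sublist[i]
--       # Verifica continuidad en la fila y columnas consecutivas
--       if int(previous[1]) == int(actual[1]) and ord(actual[0]) == ord(previous[0]) + 1:
--         actualGroup.append(actual)
--       else:
--         result.append(actualGroup)
--         actualGroup = [actual]
--     result.append(actualGroup)
--   return result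
-- ===== SOURCE B (Python) =====
-- def FixRowsConstraints(lists):
--   result = []
--   for sublist in lists:
--     if len(sublist) < 2:
--       result.append([sublist[0]])
--       continue
--     # precompute a group key per cell: cells with the same row digit and
--     # consecutive letters get the same (row, ord(letter)-position) key
--     keyed = [((int(c[1]), ord(c[0]) - i), c) for i, c in enumerate(sublist)]
--     while keyed:
--       k = keyed[0][0]
--       n = 1
--       while n < len(keyed) and keyed[n][0] == k:
--         n += 1
--       result.append([c for _, c in keyed[:n]])
--       keyed = keyed[n:]
--   return result
-- ===== Notes on version B (the rewrite author's own statement) =====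
-- stated objective: alternative
-- what changed: Replaces A's previous/current boundary state machine with a precomputed per-cell group key (int(c[1]), ord(c[0]) - i) per row and a pass that splits the keyed row into maximal runs of equal keys.
import Mathlib
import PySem

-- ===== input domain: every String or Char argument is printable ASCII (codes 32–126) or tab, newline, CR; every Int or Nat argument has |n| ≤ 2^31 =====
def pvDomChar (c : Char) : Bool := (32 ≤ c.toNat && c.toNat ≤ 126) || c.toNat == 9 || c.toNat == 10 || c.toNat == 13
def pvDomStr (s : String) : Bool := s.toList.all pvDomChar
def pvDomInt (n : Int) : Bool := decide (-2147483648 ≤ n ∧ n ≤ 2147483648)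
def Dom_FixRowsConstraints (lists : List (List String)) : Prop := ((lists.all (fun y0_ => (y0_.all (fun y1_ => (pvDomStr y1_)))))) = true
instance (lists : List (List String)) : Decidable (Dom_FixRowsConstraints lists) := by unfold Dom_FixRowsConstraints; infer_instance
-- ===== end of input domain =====

-- B replaces A's previous/current boundary state machine by precomputing a per-cell
-- group key (int(c[1]), ord(c[0]) - i) and splitting each row into maximal runs of
-- equal keys (alternative decomposition, same cost).


-- shared primitive accessors: int(s[1]) and ord(s[0]) (total forms, exact under Pre_)
def pvCol (s : String) : Int :=
  ((PySem.Str.pyGet? s 1).bind (fun c => PySem.Int.ofChars? [c])).getD 0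
def pvOrd (s : String) : Int :=
  ((PySem.Str.pyGet? s 0).map (fun c => (c.toNat : Int))).getD 0

-- ===== PORT A =====
def FixRowsConstraints (lists : List (List String)) : List (List String) :=
  lists.foldl
    (fun result sublist =>
      let st :=
        (PySem.List.pyRange 1 (sublist.length : Int) 1).foldl
          (fun (st : List (List String) × List String) i =>
            let previous := PySem.List.pyGetD sublist (i - 1) ""
            let actual := PySem.List.pyGetD sublist i ""
            if pvCol previous == pvCol actual && pvOrd actual == pvOrd previous + 1 then
              (st.1, st.2 ++ [actual])
            else
              (st.1 ++ [st.2], [actual]))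
          (result, [PySem.List.pyGetD sublist 0 ""])
      st.1 ++ [st.2])
    []

-- ===== PORT B =====
-- key of cell c at position i within its row
def pvKey (c : String) (i : Nat) : Int × Int := (pvCol c, pvOrd c - (i : Int))

-- the inner while-loop of Source B: peel off the maximal run of cells sharing the
-- first cell's key (the n-counting loop + the two slices are exactly this span)
def pvRuns : List ((Int × Int) × String) → List (List String)
  | [] => []
  | (k, c) :: rest =>
      (c :: (rest.takeWhile (fun p => p.1 == k)).map (fun p => p.2)) ::
        pvRuns (rest.dropWhile (fun p => p.1 == k))
  termination_by l => l.length
  decreasing_by simp; exact List.length_dropWhile_le _ _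

def FixRowsConstraints_alt (lists : List (List String)) : List (List String) :=
  lists.foldl
    (fun result sublist =>
      if sublist.length < 2 then
        result ++ [[PySem.List.pyGetD sublist 0 ""]]
      else
        result ++ pvRuns (sublist.zipIdx.map (fun p => (pvKey p.1 p.2, p.1))))
    []

-- ===== PRECONDITION & SPEC =====
def pvCellOK (s : String) : Bool :=
  match s.toList with
  | _ :: c :: _ => PySem.Chars.isdigit c
  | _ => false

-- exactly the inputs on which A returns: every row is nonempty (else sublist[0] raises
-- IndexError), and in every row of length ≥ 2 each cell has a digit second character
-- (else c[1] raises IndexError / int(c[1]) ValueError; a length-1 row's cell is never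
-- inspected by A's inner loop).
def Pre_FixRowsConstraints (lists : List (List String)) : Prop :=
  (lists.all (fun sub => !sub.isEmpty && (decide (sub.length < 2) || sub.all pvCellOK))) = true
instance (lists : List (List String)) : Decidable (Pre_FixRowsConstraints lists) := by
  unfold Pre_FixRowsConstraints; infer_instance

def pvWitness_FixRowsConstraints : List (List String) := [["a1", "b1", "d1"], ["x"], ["c2", "a2"]]

def Spec_FixRowsConstraints (lists : List (List String)) (out : List (List String)) : Prop :=
  out = FixRowsConstraints_alt lists
instance (lists : List (List String)) (out : List (List String)) : Decidable (Spec_FixRowsConstraints lists out) := by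
  unfold Spec_FixRowsConstraints; infer_instance

-- ===== CLAIM (what is proved, stated in full; the proofs are below) =====
def Claim_equal_FixRowsConstraints : Prop := ∀ (lists : List (List String)), Dom_FixRowsConstraints lists → Pre_FixRowsConstraints lists → Spec_FixRowsConstraints lists (FixRowsConstraints lists)

-- ===== LEMMAS AND PROOFS =====

theorem pvRuns_nil : pvRuns [] = [] := by rw [pvRuns.eq_def]

theorem pvRuns_cons (k : Int × Int) (c : String) (rest : List ((Int × Int) × String)) :
    pvRuns ((k, c) :: rest)
      = (c :: (rest.takeWhile (fun p => p.1 == k)).map (fun p => p.2)) ::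
          pvRuns (rest.dropWhile (fun p => p.1 == k)) := by rw [pvRuns.eq_def]

-- A's pair test at positions (i, i+1) is exactly equality of B's keys
theorem pv_cond_eq_key (prev a : String) (i : Nat) :
    (pvCol prev == pvCol a && pvOrd a == pvOrd prev + 1) = (pvKey a (i + 1) == pvKey prev i) := by
  apply Bool.eq_iff_iff.mpr
  simp only [Bool.and_eq_true, beq_iff_eq, pvKey, Prod.mk.injEq]
  constructor
  · rintro ⟨h1, h2⟩; refine ⟨h1.symm, ?_⟩; push_cast; omega
  · rintro ⟨h1, h2⟩; refine ⟨h1.symm, ?_⟩; push_cast at h2; omega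

-- the previous/current state machine A's inner index loop amounts to
def pvPm (st : List (List String) × List String) (prev : String) :
    List String → List (List String) × List String
  | [] => st
  | a :: rest =>
      pvPm (if pvCol prev == pvCol a && pvOrd a == pvOrd prev + 1 then
              (st.1, st.2 ++ [a])
            else
              (st.1 ++ [st.2], [a])) a rest

-- L1: A's foldl over range(j, len) with xs[i-1]/xs[i] lookups is pvPm on drop j
theorem pv_fold_eq_pm (xs : List String) (n j : Nat) (hn : xs.length = j + n) (hj : 1 ≤ j)
    (st : List (List String) × List String) :
    (PySem.List.pyRange (j : Int) (xs.length : Int) 1).foldl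
        (fun (st : List (List String) × List String) i =>
          let previous := PySem.List.pyGetD xs (i - 1) ""
          let actual := PySem.List.pyGetD xs i ""
          if pvCol previous == pvCol actual && pvOrd actual == pvOrd previous + 1 then
            (st.1, st.2 ++ [actual])
          else
            (st.1 ++ [st.2], [actual])) st
      = pvPm st (xs.getD (j - 1) "") (xs.drop j) := by
  induction n generalizing j st with
  | zero =>
      rw [PySem.List.pyRange_one_eq_nil (by omega)]
      rw [List.drop_of_length_le (by omega)]
      rfl
  | succ m ih =>
      have hjlt : j < xs.length := by omega
      rw [PySem.List.pyRange_one_cons (by exact_mod_cast hjlt)]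
      rw [List.foldl_cons]
      have hprev : PySem.List.pyGetD xs ((j : Int) - 1) "" = xs.getD (j - 1) "" := by
        rw [show ((j : Int) - 1) = ((j - 1 : Nat) : Int) by omega]
        rw [PySem.List.pyGetD_of_nonneg _ _ (by positivity)]
        simp
      have hact : PySem.List.pyGetD xs (j : Int) "" = xs.getD j "" := by
        rw [PySem.List.pyGetD_of_nonneg _ _ (by positivity)]
        simp
      have hdrop : xs.drop j = xs.getD j "" :: xs.drop (j + 1) := by
        rw [List.getD_eq_getElem xs _ hjlt]
        exact List.drop_eq_getElem_cons hjlt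
      rw [show ((j : Int) + 1) = (((j + 1 : Nat)) : Int) by push_cast; ring]
      rw [ih (j + 1) (by omega) (by omega)]
      rw [hdrop]
      simp only [pvPm, hprev, hact, Nat.add_sub_cancel]

def pvKeyed (i : Nat) (l : List String) : List ((Int × Int) × String) :=
  (l.zipIdx i).map (fun p => (pvKey p.1 p.2, p.1))

theorem pvKeyed_cons (i : Nat) (a : String) (l : List String) :
    pvKeyed i (a :: l) = (pvKey a i, a) :: pvKeyed (i + 1) l := by
  simp [pvKeyed, List.zipIdx_cons]

-- L2: running the state machine over the tail = grouping the keyed tail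
theorem pv_pm_eq_runs (tail : List String) (i : Nat) (prev : String)
    (res : List (List String)) (grp : List String) :
    (pvPm (res, grp) prev tail).1 ++ [(pvPm (res, grp) prev tail).2]
      = res ++ (grp ++ ((pvKeyed (i + 1) tail).takeWhile (fun p => p.1 == pvKey prev i)).map
            (fun p => p.2))
          :: pvRuns ((pvKeyed (i + 1) tail).dropWhile (fun p => p.1 == pvKey prev i)) := by
  induction tail generalizing i prev res grp with
  | nil => simp [pvPm, pvKeyed, pvRuns_nil]
  | cons a rest ih =>
      rw [pvKeyed_cons]
      simp only [pvPm, List.takeWhile_cons, List.dropWhile_cons]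
      rw [pv_cond_eq_key prev a i]
      by_cases h : (pvKey a (i + 1) == pvKey prev i) = true
      · have hk : pvKey a (i + 1) = pvKey prev i := beq_iff_eq.mp h
        rw [if_pos h, if_pos h, ih (i + 1) a res (grp ++ [a])]
        simp [hk]
      · have hne : pvKey a (i + 1) ≠ pvKey prev i := by simpa using h
        rw [if_neg h, if_neg h, if_neg h, ih (i + 1) a (res ++ [grp]) [a]]
        rw [pvRuns_cons]
        simp

-- per-row equality of the two loop bodies
theorem pv_body_eq (res : List (List String)) (xs : List String) :
    ((PySem.List.pyRange 1 (xs.length : Int) 1).foldl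
        (fun (st : List (List String) × List String) i =>
          let previous := PySem.List.pyGetD xs (i - 1) ""
          let actual := PySem.List.pyGetD xs i ""
          if pvCol previous == pvCol actual && pvOrd actual == pvOrd previous + 1 then
            (st.1, st.2 ++ [actual])
          else
            (st.1 ++ [st.2], [actual]))
        (res, [PySem.List.pyGetD xs 0 ""])).1
      ++ [((PySem.List.pyRange 1 (xs.length : Int) 1).foldl
        (fun (st : List (List String) × List String) i =>
          let previous := PySem.List.pyGetD xs (i - 1) ""
          let actual := PySem.List.pyGetD xs i ""
          if pvCol previous == pvCol actual && pvOrd actual == pvOrd previous + 1 then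
            (st.1, st.2 ++ [actual])
          else
            (st.1 ++ [st.2], [actual]))
        (res, [PySem.List.pyGetD xs 0 ""])).2]
      = (if xs.length < 2 then
           res ++ [[PySem.List.pyGetD xs 0 ""]]
         else
           res ++ pvRuns (xs.zipIdx.map (fun p => (pvKey p.1 p.2, p.1)))) := by
  cases xs with
  | nil => simp [PySem.List.pyRange_one_eq_nil]
  | cons x tail =>
      have h0 : PySem.List.pyGetD (x :: tail) 0 "" = x := by
        rw [PySem.List.pyGetD_of_nonneg _ _ (by norm_num)]; rfl
      have hfold := pv_fold_eq_pm (x :: tail) tail.length 1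
        (by rw [List.length_cons]; omega) (by omega)
        (res, [PySem.List.pyGetD (x :: tail) 0 ""])
      simp only [Nat.cast_one] at hfold
      rw [hfold]
      have hdrop : (x :: tail).drop 1 = tail := rfl
      have hget : (x :: tail).getD (1 - 1) "" = x := rfl
      rw [hdrop, hget, h0, pv_pm_eq_runs tail 0 x res [x]]
      by_cases hl : (x :: tail).length < 2
      · have htail : tail = [] := by
          cases tail with
          | nil => rfl
          | cons b bs => simp at hl
        subst htail
        simp [pvKeyed, pvRuns_nil]
      · rw [if_neg hl]
        have hz : (x :: tail).zipIdx.map (fun p => (pvKey p.1 p.2, p.1)) = pvKeyed 0 (x :: tail) := rfl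
        rw [hz, pvKeyed_cons, pvRuns_cons]
        simp

theorem pv_foldl_eq (l : List (List String)) (res : List (List String)) :
    l.foldl
      (fun result sublist =>
        let st :=
          (PySem.List.pyRange 1 (sublist.length : Int) 1).foldl
            (fun (st : List (List String) × List String) i =>
              let previous := PySem.List.pyGetD sublist (i - 1) ""
              let actual := PySem.List.pyGetD sublist i ""
              if pvCol previous == pvCol actual && pvOrd actual == pvOrd previous + 1 then
                (st.1, st.2 ++ [actual])
              else
                (st.1 ++ [st.2], [actual]))
            (result, [PySem.List.pyGetD sublist 0 ""])
        st.1 ++ [st.2]) res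
      = l.foldl
          (fun result sublist =>
            if sublist.length < 2 then
              result ++ [[PySem.List.pyGetD sublist 0 ""]]
            else
              result ++ pvRuns (sublist.zipIdx.map (fun p => (pvKey p.1 p.2, p.1)))) res := by
  induction l generalizing res with
  | nil => rfl
  | cons x t ih =>
      rw [List.foldl_cons, List.foldl_cons]
      simp only [pv_body_eq res x]
      exact ih _

-- ===== VERDICT (by name: the statement is the Claim_ definition above) =====
theorem FixRowsConstraints_spec : Claim_equal_FixRowsConstraints := by
  intro lists _ _
  unfold Spec_FixRowsConstraints FixRowsConstraints FixRowsConstraints_alt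
  exact pv_foldl_eq lists []
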